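-- pv_equiv track=rewrite | github.com/microsoft/onnxscript | src/mobius/_graph_diff.py | _change_status
-- ===== SOURCE A (Python) =====
-- from typing import Any
--
-- _STATUS_NO_CHANGE = "⚪"
--
-- _STATUS_MINOR = "🔵"
--
-- _STATUS_MODERATE = "🟡"
--
-- _STATUS_MAJOR = "🔴"
--
-- def _change_status(change_list: list[dict[str, Any]]) -> str:
--     """Pick a status emoji based on the severity of changes."""
--     if not change_list:
--         return _STATUS_NO_CHANGE
--     types = {c["type"] for c in change_list}
--     if types & {"interface_change"}:
--         return _STATUS_MAJOR
--     if types & {"added_node", "removed_node", "changed_connectivity"}: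
--         return _STATUS_MODERATE
--     if types & {"changed_attrs", "initializer_change"}:
--         return _STATUS_MINOR
--     return _STATUS_MINOR
-- ===== SOURCE B (Python) =====
-- _STATUS_NO_CHANGE = "⚪"
-- _STATUS_MINOR = "🔵"
-- _STATUS_MODERATE = "🟡"
-- _STATUS_MAJOR = "🔴"
--
-- _RANK = {
--     "interface_change": 3,
--     "added_node": 2,
--     "removed_node": 2,
--     "changed_connectivity": 2,
-- }
--
-- _EMOJI = {3: _STATUS_MAJOR, 2: _STATUS_MODERATE, 1: _STATUS_MINOR}
--
--
-- def _change_status(change_list):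
--     """Pick a status emoji based on the severity of changes."""
--     if not change_list:
--         return _STATUS_NO_CHANGE
--     rank = 1
--     for c in change_list:
--         rank = max(rank, _RANK.get(c["type"], 1))
--     return _EMOJI[rank]
-- ===== Notes on version B (the rewrite author's own statement) =====
-- stated objective: simpler
-- what changed: Replaces the build-a-set-then-test-three-intersections cascade with a single pass computing the maximum severity rank via a type->rank table, then a rank->emoji table; no set is materialised.
import Mathlib
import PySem

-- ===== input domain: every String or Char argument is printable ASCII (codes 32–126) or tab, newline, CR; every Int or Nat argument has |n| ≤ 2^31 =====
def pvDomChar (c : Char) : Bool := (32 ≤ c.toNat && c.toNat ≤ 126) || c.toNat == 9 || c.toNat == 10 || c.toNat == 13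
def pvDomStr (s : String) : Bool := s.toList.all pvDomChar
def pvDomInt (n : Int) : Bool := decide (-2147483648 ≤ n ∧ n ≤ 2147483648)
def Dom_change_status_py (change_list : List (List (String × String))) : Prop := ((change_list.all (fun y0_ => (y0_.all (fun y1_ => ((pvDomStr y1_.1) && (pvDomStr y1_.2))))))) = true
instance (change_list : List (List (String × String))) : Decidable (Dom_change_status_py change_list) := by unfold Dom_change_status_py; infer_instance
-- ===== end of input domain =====

-- B replaces A's set-of-types plus three intersection tests by a single max-severity-rank
-- pass over the list with a type→rank table and a rank→emoji table (objective: simpler).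

-- module constants
def pvStatusNoChange : String := "⚪"
def pvStatusMinor : String := "🔵"
def pvStatusModerate : String := "🟡"
def pvStatusMajor : String := "🔴"

-- c["type"]: first match in the association list; the .getD "" default is unreachable
-- under Pre_ (Python raises KeyError there, which Pre_ excludes)
def pvTypeOf (c : List (String × String)) : String :=
  ((PySem.Dict.mk c).get? "type").getD ""

-- ===== PORT A =====
def change_status_py (change_list : List (List (String × String))) : String :=
  if change_list.isEmpty then pvStatusNoChange
  else
    let types : PySem.Set String := PySem.Set.ofList (change_list.map pvTypeOf)
    if PySem.Set.inter types (PySem.Set.ofList ["interface_change"]) ≠ [] then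
      pvStatusMajor
    else if PySem.Set.inter types (PySem.Set.ofList ["added_node", "removed_node", "changed_connectivity"]) ≠ [] then
      pvStatusModerate
    else if PySem.Set.inter types (PySem.Set.ofList ["changed_attrs", "initializer_change"]) ≠ [] then
      pvStatusMinor
    else pvStatusMinor

-- ===== PORT B =====
def pvRank : PySem.Dict String Int :=
  PySem.Dict.mk [("interface_change", 3), ("added_node", 2), ("removed_node", 2), ("changed_connectivity", 2)]

def pvEmoji : PySem.Dict Int String :=
  PySem.Dict.mk [(3, pvStatusMajor), (2, pvStatusModerate), (1, pvStatusMinor)]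

def change_status_py_alt (change_list : List (List (String × String))) : String :=
  if change_list.isEmpty then pvStatusNoChange
  else
    let rank := change_list.foldl (fun r c => max r (pvRank.getD (pvTypeOf c) 1)) 1
    -- _EMOJI[rank]: rank is always 1, 2 or 3 so this lookup never misses (KeyError impossible)
    ((pvEmoji.get? rank).getD "")

-- ===== PRECONDITION & SPEC =====
-- Pre_ excludes exactly the inputs where some change dict lacks the key "type",
-- on which the Python A (and B) raises KeyError.
def Pre_change_status_py (change_list : List (List (String × String))) : Prop :=
  change_list.all (fun c => (PySem.Dict.mk c).contains "type") = true
instance (change_list : List (List (String × String))) : Decidable (Pre_change_status_py change_list) := by unfold Pre_change_status_py; infer_instance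

def pvWitness_change_status_py : (List (List (String × String))) :=
  [[("type", "added_node"), ("name", "n1")], [("type", "changed_attrs")]]

def Spec_change_status_py (change_list : List (List (String × String))) (out : String) : Prop := out = change_status_py_alt change_list
instance (change_list : List (List (String × String))) (out : String) : Decidable (Spec_change_status_py change_list out) := by unfold Spec_change_status_py; infer_instance

-- ===== CLAIM (what is proved, stated in full; the proofs are below) =====
def Claim_equal_change_status_py : Prop := ∀ (change_list : List (List (String × String))), Dom_change_status_py change_list → Pre_change_status_py change_list → Spec_change_status_py change_list (change_status_py change_list)

-- ===== LEMMAS AND PROOFS =====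

-- rank table, case-analysed for an arbitrary type string
theorem pvRank_getD (t : String) :
    pvRank.getD t 1 =
      if t = "interface_change" then 3
      else if t = "added_node" ∨ t = "removed_node" ∨ t = "changed_connectivity" then 2
      else 1 := by
  simp only [pvRank, PySem.Dict.getD_eq_get?_getD, PySem.Dict.get?_mk_cons, beq_iff_eq]
  split_ifs with h1 h2 h3 h4 h5 h6 h7 <;> (simp_all [PySem.Dict.get?]; try tauto)

theorem pv_foldl_max_shift (ts : List String) (a b : Int) :
    ts.foldl (fun r t => max r (pvRank.getD t 1)) (max a b)
      = max a (ts.foldl (fun r t => max r (pvRank.getD t 1)) b) := by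
  induction ts generalizing b with
  | nil => rfl
  | cons t ts ih => simp only [List.foldl_cons, max_assoc, ih]

-- characterisation of B's fold (over the mapped type strings)
theorem pvM_char (ts : List String) :
    (ts.foldl (fun r t => max r (pvRank.getD t 1)) 1 = 3 ↔ "interface_change" ∈ ts) ∧
    (2 ≤ ts.foldl (fun r t => max r (pvRank.getD t 1)) 1 ↔
      ("interface_change" ∈ ts ∨ "added_node" ∈ ts ∨ "removed_node" ∈ ts ∨ "changed_connectivity" ∈ ts)) ∧
    1 ≤ ts.foldl (fun r t => max r (pvRank.getD t 1)) 1 ∧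
    ts.foldl (fun r t => max r (pvRank.getD t 1)) 1 ≤ 3 := by
  induction ts with
  | nil => simp
  | cons t ts ih =>
    obtain ⟨ih3, ih2, ihlo, ihhi⟩ := ih
    have hstep : (t :: ts).foldl (fun r t => max r (pvRank.getD t 1)) 1
        = max (pvRank.getD t 1) (ts.foldl (fun r t => max r (pvRank.getD t 1)) 1) := by
      have := pv_foldl_max_shift ts (pvRank.getD t 1) 1
      simpa [List.foldl_cons, max_comm] using this
    rw [hstep, pvRank_getD]
    split_ifs with h1 h2
    · subst h1
      simp only [List.mem_cons, true_or, iff_true]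
      omega
    · refine ⟨?_, ?_, by omega, by omega⟩
      · simp only [List.mem_cons]
        constructor
        · intro h; right; exact ih3.mp (by omega)
        · rintro (h | h)
          · exact absurd h.symm h1
          · have := ih3.mpr h; omega
      · simp only [List.mem_cons]
        constructor
        · intro _
          rcases h2 with h | h | h
          · exact Or.inr (Or.inl (Or.inl h.symm))
          · exact Or.inr (Or.inr (Or.inl (Or.inl h.symm)))
          · exact Or.inr (Or.inr (Or.inr (Or.inl h.symm)))
        · intro _; omega
    · have hna : ¬ t = "added_node" := fun h => h2 (Or.inl h)
      have hnr : ¬ t = "removed_node" := fun h => h2 (Or.inr (Or.inl h))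
      have hnc : ¬ t = "changed_connectivity" := fun h => h2 (Or.inr (Or.inr h))
      refine ⟨?_, ?_, by omega, by omega⟩
      · simp only [List.mem_cons]
        constructor
        · intro h; right; exact ih3.mp (by omega)
        · rintro (h | h)
          · exact absurd h.symm h1
          · have := ih3.mpr h; omega
      · simp only [List.mem_cons]
        constructor
        · intro h
          rcases ih2.mp (by omega) with h | h | h | h
          · exact Or.inl (Or.inr h)
          · exact Or.inr (Or.inl (Or.inr h))
          · exact Or.inr (Or.inr (Or.inl (Or.inr h)))
          · exact Or.inr (Or.inr (Or.inr (Or.inr h)))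
        · rintro ((h | h) | (h | h) | (h | h) | (h | h))
          · exact absurd h.symm h1
          · have := ih2.mpr (Or.inl h); omega
          · exact absurd h.symm hna
          · have := ih2.mpr (Or.inr (Or.inl h)); omega
          · exact absurd h.symm hnr
          · have := ih2.mpr (Or.inr (Or.inr (Or.inl h))); omega
          · exact absurd h.symm hnc
          · have := ih2.mpr (Or.inr (Or.inr (Or.inr h))); omega

theorem pv_inter_ne_nil (xs l : List String) :
    PySem.Set.inter (PySem.Set.ofList xs) l ≠ [] ↔ ∃ y ∈ xs, y ∈ l := by
  constructor
  · intro h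
    obtain ⟨y, hy⟩ := List.exists_mem_of_ne_nil _ h
    have hm := (PySem.Set.mem_inter _ _ _).mp hy
    exact ⟨y, (PySem.Set.mem_ofList ..).mp hm.1, hm.2⟩
  · rintro ⟨y, hy, hl⟩ hnil
    have hmem : y ∈ PySem.Set.inter (PySem.Set.ofList xs) l :=
      (PySem.Set.mem_inter _ _ _).mpr ⟨(PySem.Set.mem_ofList ..).mpr hy, hl⟩
    rw [hnil] at hmem
    simp at hmem

-- ===== VERDICT (by name: the statement is the Claim_ definition above) =====
theorem change_status_py_spec : Claim_equal_change_status_py := by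
  intro cl _hdom _hpre
  unfold Spec_change_status_py change_status_py change_status_py_alt
  cases cl with
  | nil => rfl
  | cons c0 cs =>
    simp only [List.isEmpty_cons, if_neg (by simp : ¬ false = true)]
    set ts := (c0 :: cs).map pvTypeOf with hts
    have hfold : (c0 :: cs).foldl (fun r c => max r (pvRank.getD (pvTypeOf c) 1)) 1
        = ts.foldl (fun r t => max r (pvRank.getD t 1)) 1 := by
      rw [hts, List.foldl_map]
    obtain ⟨h3, h2, hlo, hhi⟩ := pvM_char ts
    set M := ts.foldl (fun r t => max r (pvRank.getD t 1)) 1 with hM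
    rw [hfold]
    by_cases hif : "interface_change" ∈ ts
    · rw [if_pos ((pv_inter_ne_nil ts _).mpr ⟨_, hif, by simp⟩)]
      have : M = 3 := h3.mpr hif
      rw [this]
      rfl
    · rw [if_neg (by
        intro h
        obtain ⟨y, hy, hyl⟩ := (pv_inter_ne_nil ts _).mp h
        simp at hyl; subst hyl; exact hif hy)]
      by_cases hmod : "added_node" ∈ ts ∨ "removed_node" ∈ ts ∨ "changed_connectivity" ∈ ts
      · rw [if_pos (by
          refine (pv_inter_ne_nil ts _).mpr ?_
          rcases hmod with h|h|h <;> exact ⟨_, h, by simp⟩)]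
        have hM2 : M = 2 := by
          have := h2.mpr (Or.inr hmod)
          have hne3 : M ≠ 3 := fun h => hif (h3.mp h)
          omega
        rw [hM2]; rfl
      · rw [if_neg (by
          intro h
          obtain ⟨y, hy, hyl⟩ := (pv_inter_ne_nil ts _).mp h
          simp at hyl
          rcases hyl with h|h|h <;> subst h <;> tauto)]
        have hM1 : M = 1 := by
          have : ¬ 2 ≤ M := fun h => (by tauto : ¬ ("interface_change" ∈ ts ∨ _)) (h2.mp h)
          omega
        split <;> · rw [hM1]; rfl
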